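-- pv_equiv track=rewrite | github.com/silvinadelgadotridon/Python | Python_UNSAM/Clase11/ejercicios11.py | promediar_aux
-- ===== SOURCE A (Python) =====
-- def promediar_aux(lista):   #firma natural de la función promediar()
--     suma = lista[0]
--     cantidad = 1
--     if len(lista) > 1:
--         suma_resto, cantidad_resto = promediar_aux(lista[1:])
--         suma += suma_resto
--         cantidad += cantidad_resto
--     return suma, cantidad
-- ===== SOURCE B (Python) =====
-- def promediar_aux(lista):
--     # No explicit loop or recursion: builtin aggregates give the same pair.
--     return sum(lista), len(lista)
-- ===== Notes on version B (the rewrite author's own statement) =====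
-- stated objective: idiomatic
-- what changed: Replaced A's tail-slicing linear recursion with a direct call to the builtin aggregates sum() and len(), with no explicit loop or recursion at all.
import Mathlib
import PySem

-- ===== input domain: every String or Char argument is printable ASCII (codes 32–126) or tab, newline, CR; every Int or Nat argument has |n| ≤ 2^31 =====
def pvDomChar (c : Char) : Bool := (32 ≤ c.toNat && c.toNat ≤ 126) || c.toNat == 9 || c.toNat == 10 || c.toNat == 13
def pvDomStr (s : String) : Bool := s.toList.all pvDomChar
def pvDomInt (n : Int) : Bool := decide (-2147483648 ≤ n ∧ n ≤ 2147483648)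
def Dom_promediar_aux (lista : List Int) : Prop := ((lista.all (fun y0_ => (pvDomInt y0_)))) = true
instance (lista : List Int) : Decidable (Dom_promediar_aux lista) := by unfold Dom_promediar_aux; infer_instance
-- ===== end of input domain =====

-- B replaces A's tail-slicing recursion with builtin aggregates sum()/len(); same value on every nonempty list.

-- ===== PORT A =====
-- A recurses on lista[1:] when len(lista) > 1; on [] it raises IndexError (excluded by Pre_).
def promediar_aux (lista : List Int) : Int × Int :=
  match lista with
  | [] => (0, 0)      -- unreachable under Pre_: Python raises IndexError here
  | x :: rest =>
    if rest.length > 0 then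
      let r := promediar_aux rest
      (x + r.1, 1 + r.2)
    else
      (x, 1)

-- ===== PORT B =====
-- B: return sum(lista), len(lista) — the builtin aggregates.
def promediar_aux_alt (lista : List Int) : Int × Int :=
  (lista.sum, (lista.length : Int))

-- ===== PRECONDITION & SPEC =====
-- A raises IndexError on the empty list (lista[0]); Pre_ excludes exactly that input.
def Pre_promediar_aux (lista : List Int) : Prop := lista ≠ []
instance (lista : List Int) : Decidable (Pre_promediar_aux lista) := by unfold Pre_promediar_aux; infer_instance
def pvWitness_promediar_aux : List Int := [3, -1, 4]

def Spec_promediar_aux (lista : List Int) (out : Int × Int) : Prop := out = promediar_aux_alt lista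
instance (lista : List Int) (out : Int × Int) : Decidable (Spec_promediar_aux lista out) := by unfold Spec_promediar_aux; infer_instance

-- ===== CLAIM (what is proved, stated in full; the proofs are below) =====
def Claim_equal_promediar_aux : Prop := ∀ (lista : List Int), Dom_promediar_aux lista → Pre_promediar_aux lista → Spec_promediar_aux lista (promediar_aux lista)

-- ===== LEMMAS AND PROOFS =====

theorem promediar_aux_eq_sum_length (lista : List Int) (h : lista ≠ []) :
    promediar_aux lista = (lista.sum, (lista.length : Int)) := by
  induction lista with
  | nil => exact absurd rfl h
  | cons x rest ih =>
    cases rest with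
    | nil => simp [promediar_aux]
    | cons y t =>
      have hr := ih (by simp)
      have step : promediar_aux (x :: y :: t)
          = (x + (promediar_aux (y :: t)).1, 1 + (promediar_aux (y :: t)).2) := by
        conv_lhs => rw [promediar_aux]
        simp
      rw [step, hr]
      simp
      ring

-- ===== VERDICT (by name: the statement is the Claim_ definition above) =====
theorem promediar_aux_spec : Claim_equal_promediar_aux := by
  intro lista _ hpre
  unfold Spec_promediar_aux promediar_aux_alt
  rw [promediar_aux_eq_sum_length lista hpre]
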